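-- pv_equiv track=rewrite | github.com/TheDarkLightX/ZenoDEX | tools/intent_harness.py | normalize_spec_text
-- ===== SOURCE A (Python) =====
-- from typing import Callable, Dict, List, Tuple, Optional
--
-- def normalize_spec_text(text: str) -> str:
--     """Strip comments, remove `set charvar`, and collapse multi-line always blocks."""
--     lines: List[str] = []
--     raw = text.splitlines()
--     i = 0
--     while i < len(raw):
--         line = raw[i]
--         stripped = line.strip()
--         if stripped.startswith("#"):
--             i += 1
--             continue
--         if stripped.startswith("set charvar"):
--             i += 1
--             continue
--         if stripped.startswith("always"):
--             expr_parts: List[str] = []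
--             tail = stripped[len("always"):].strip()
--             if tail:
--                 expr_parts.append(tail)
--             i += 1
--             while i < len(raw):
--                 nxt = raw[i].strip()
--                 if nxt.startswith("#"):
--                     i += 1
--                     continue
--                 expr_parts.append(nxt)
--                 if nxt.endswith("."):
--                     break
--                 i += 1
--             joined = " ".join(expr_parts)
--             if joined.endswith("."):
--                 joined = joined[:-1]
--             lines.append(f"always {joined}.")
--             i += 1
--             continue
--         if stripped:
--             lines.append(stripped)
--         i += 1
--     return "\n".join(lines) + "\n"
-- ===== SOURCE B (Python) =====
-- def _flush(parts):
--     joined = " ".join(parts)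
--     if joined.endswith("."):
--         joined = joined[:-1]
--     return "always " + joined + "."
--
-- def normalize_spec_text(text: str) -> str:
--     """Strip comments, remove `set charvar`, and collapse multi-line always blocks."""
--     out = []
--     collecting = False
--     parts = []
--     for raw in text.splitlines():
--         s = raw.strip()
--         if collecting:
--             if s.startswith("#"):
--                 continue
--             parts.append(s)
--             if s.endswith("."):
--                 out.append(_flush(parts))
--                 parts = []
--                 collecting = False
--         else:
--             if s.startswith("#") or s.startswith("set charvar"):
--                 continue
--             if s.startswith("always"):
--                 tail = s[len("always"):].strip()
--                 parts = [tail] if tail else []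
--                 collecting = True
--             elif s:
--                 out.append(s)
--     if collecting:
--         out.append(_flush(parts))
--     return "\n".join(out) + "\n"
-- ===== Notes on version B (the rewrite author's own statement) =====
-- stated objective: simpler
-- what changed: Replaces A's nested index-based while loops with a single linear pass over splitlines driven by an in-block state flag plus a final flush, with the always-block assembly factored into a _flush helper.
import Mathlib
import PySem

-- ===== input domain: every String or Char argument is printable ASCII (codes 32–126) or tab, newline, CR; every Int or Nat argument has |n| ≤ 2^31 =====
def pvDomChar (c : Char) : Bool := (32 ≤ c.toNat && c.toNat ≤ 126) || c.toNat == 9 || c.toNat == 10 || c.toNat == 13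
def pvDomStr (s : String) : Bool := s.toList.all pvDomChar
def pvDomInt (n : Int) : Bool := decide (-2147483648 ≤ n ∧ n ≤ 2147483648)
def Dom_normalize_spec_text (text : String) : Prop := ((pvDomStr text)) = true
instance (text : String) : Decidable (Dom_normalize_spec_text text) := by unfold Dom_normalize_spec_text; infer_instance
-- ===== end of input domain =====

-- B replaces A's nested index-based while loops with one linear fold over the lines
-- driven by an in-block state flag (objective: simpler decomposition, same cost).

-- ===== PORT A =====
-- A's inner `while i < len(raw)` loop of the `always` branch: consumes lines from
-- `rest`, accumulating `parts`; returns (expr_parts, remaining lines after the break).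
def pvInnerA : List String → List String → (List String × List String)
  | [], parts => (parts, [])
  | l :: rest, parts =>
    let nxt := PySem.Str.strip l
    if PySem.Str.startswith nxt "#" then pvInnerA rest parts
    else if PySem.Str.endswith nxt "." then (parts ++ [nxt], rest)
    else pvInnerA rest (parts ++ [nxt])

-- termination measure for pvOuterA: the inner loop never grows the remaining lines
theorem pvInnerA_len : ∀ (rest parts : List String),
    (pvInnerA rest parts).2.length ≤ rest.length := by
  intro rest
  induction rest with
  | nil => intro parts; simp [pvInnerA]
  | cons l rest ih =>
    intro parts
    simp only [pvInnerA]
    split_ifs with h1 h2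
    · exact le_trans (ih parts) (Nat.le_succ _)
    · simp
    · exact le_trans (ih (parts ++ [PySem.Str.strip l])) (Nat.le_succ _)

-- A's outer `while i < len(raw)` loop, accumulating `lines`.
def pvOuterA : List String → List String → List String
  | [], lines => lines
  | l :: rest, lines =>
    let s := PySem.Str.strip l
    if PySem.Str.startswith s "#" then pvOuterA rest lines
    else if PySem.Str.startswith s "set charvar" then pvOuterA rest lines
    else if PySem.Str.startswith s "always" then
      -- tail = stripped[len("always"):].strip()
      let tail := PySem.Str.strip (PySem.Str.slice s (some 6) none)
      let parts0 := if tail ≠ "" then [tail] else []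
      let pr := pvInnerA rest parts0
      let joined := PySem.Str.join " " pr.1
      let joined2 := if PySem.Str.endswith joined "." then PySem.Str.slice joined none (some (-1)) else joined
      pvOuterA pr.2 (lines ++ ["always " ++ joined2 ++ "."])
    else if s ≠ "" then pvOuterA rest (lines ++ [s])
    else pvOuterA rest lines
termination_by raw _ => raw.length
decreasing_by
  all_goals simp
  exact pvInnerA_len _ _

def normalize_spec_text (text : String) : String :=
  PySem.Str.join "\n" (pvOuterA (PySem.Str.splitlines text) []) ++ "\n"

-- ===== PORT B =====
-- B's _flush helper
def pvFlushB (parts : List String) : String :=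
  let joined := PySem.Str.join " " parts
  let joined2 := if PySem.Str.endswith joined "." then PySem.Str.slice joined none (some (-1)) else joined
  "always " ++ joined2 ++ "."

-- one step of B's single for-loop; state = (out, collecting, parts)
def pvStepB : (List String × Bool × List String) → String → (List String × Bool × List String)
  | (out, collecting, parts), raw =>
    let s := PySem.Str.strip raw
    if collecting then
      if PySem.Str.startswith s "#" then (out, true, parts)
      else if PySem.Str.endswith s "." then (out ++ [pvFlushB (parts ++ [s])], false, [])
      else (out, true, parts ++ [s])
    else
      if PySem.Str.startswith s "#" || PySem.Str.startswith s "set charvar" then (out, false, parts)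
      else if PySem.Str.startswith s "always" then
        let tail := PySem.Str.strip (PySem.Str.slice s (some 6) none)
        (out, true, if tail ≠ "" then [tail] else [])
      else if s ≠ "" then (out ++ [s], false, parts)
      else (out, false, parts)

-- B's trailing `if collecting: out.append(_flush(parts))`
def pvFinishB (st : List String × Bool × List String) : List String :=
  if st.2.1 then st.1 ++ [pvFlushB st.2.2] else st.1

def normalize_spec_text_alt (text : String) : String :=
  PySem.Str.join "\n" (pvFinishB ((PySem.Str.splitlines text).foldl pvStepB ([], false, []))) ++ "\n"

-- ===== PRECONDITION & SPEC =====
def Spec_normalize_spec_text (text : String) (out : String) : Prop := out = normalize_spec_text_alt text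
instance (text : String) (out : String) : Decidable (Spec_normalize_spec_text text out) := by unfold Spec_normalize_spec_text; infer_instance

-- ===== CLAIM (what is proved, stated in full; the proofs are below) =====
def Claim_equal_normalize_spec_text : Prop := ∀ (text : String), Dom_normalize_spec_text text → Spec_normalize_spec_text text (normalize_spec_text text)

-- ===== LEMMAS AND PROOFS =====

-- unfolding lemmas for the well-founded pvOuterA
theorem pvOuterA_nil (lines : List String) : pvOuterA [] lines = lines := by
  rw [pvOuterA]

theorem pvOuterA_cons (l : String) (rest lines : List String) :
    pvOuterA (l :: rest) lines =
      (let s := PySem.Str.strip l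
       if PySem.Str.startswith s "#" then pvOuterA rest lines
       else if PySem.Str.startswith s "set charvar" then pvOuterA rest lines
       else if PySem.Str.startswith s "always" then
         let tail := PySem.Str.strip (PySem.Str.slice s (some 6) none)
         let parts0 := if tail ≠ "" then [tail] else []
         let pr := pvInnerA rest parts0
         let joined := PySem.Str.join " " pr.1
         let joined2 := if PySem.Str.endswith joined "." then PySem.Str.slice joined none (some (-1)) else joined
         pvOuterA pr.2 (lines ++ ["always " ++ joined2 ++ "."])
       else if s ≠ "" then pvOuterA rest (lines ++ [s])
       else pvOuterA rest lines) := by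
  rw [pvOuterA]

-- The single fold of B, in either state, computes exactly A's nested loops.
set_option maxHeartbeats 1600000 in
theorem pvKey : ∀ (rest : List String),
    (∀ out parts, pvFinishB (rest.foldl pvStepB (out, false, parts)) = pvOuterA rest out)
    ∧ (∀ out parts, pvFinishB (rest.foldl pvStepB (out, true, parts))
        = pvOuterA (pvInnerA rest parts).2 (out ++ [pvFlushB (pvInnerA rest parts).1])) := by
  intro rest
  induction rest with
  | nil =>
    constructor
    · intro out parts; simp [pvFinishB, pvOuterA_nil]
    · intro out parts; simp [pvFinishB, pvInnerA, pvOuterA_nil]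
  | cons l rest ih =>
    constructor
    · intro out parts
      rw [List.foldl_cons, pvOuterA_cons]
      simp only [pvStepB]
      split_ifs <;> simp_all [ih.1, ih.2, pvFinishB, pvFlushB]
    · intro out parts
      rw [List.foldl_cons]
      simp only [pvStepB, pvInnerA]
      split_ifs <;> simp_all [ih.1, ih.2, pvFinishB, pvFlushB]

-- ===== VERDICT (by name: the statement is the Claim_ definition above) =====
theorem normalize_spec_text_spec : Claim_equal_normalize_spec_text := by
  intro text _
  unfold Spec_normalize_spec_text normalize_spec_text normalize_spec_text_alt
  rw [(pvKey (PySem.Str.splitlines text)).1]
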